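-- pv_equiv track=rewrite | github.com/Comethosimi/discord_bot | zikan.py | time_chech
-- ===== SOURCE A (Python) =====
-- num_list = ['0','1','2','3','4','5','6','7','8','9']
--
-- def time_chech(s):
-- 	res = 0
-- 	flag = 1
-- 	if len(s) != 5:flag = 0
-- 	for i in range(len(s)):
-- 		if i == 2:continue
-- 		if s[i] in num_list:continue
-- 		else:flag = 0
--
-- 	return flag
-- ===== SOURCE B (Python) =====
-- def _dig(c):
--     return 48 <= ord(c) <= 57
--
-- def time_chech(s):
--     try:
--         a, b, _, d, e = s
--     except ValueError:
--         return 0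
--     return _dig(a) * _dig(b) * _dig(d) * _dig(e)
-- ===== Notes on version B (the rewrite author's own statement) =====
-- stated objective: simpler
-- what changed: Replaced A's index loop with a flag and list-membership test by tuple-destructuring the string into its five characters (unpack failure handles the length check) and multiplying four ordinal-range digit indicators 48<=ord(c)<=57, with no loop, no flag, no container and no inspection of position 2.
import Mathlib
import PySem

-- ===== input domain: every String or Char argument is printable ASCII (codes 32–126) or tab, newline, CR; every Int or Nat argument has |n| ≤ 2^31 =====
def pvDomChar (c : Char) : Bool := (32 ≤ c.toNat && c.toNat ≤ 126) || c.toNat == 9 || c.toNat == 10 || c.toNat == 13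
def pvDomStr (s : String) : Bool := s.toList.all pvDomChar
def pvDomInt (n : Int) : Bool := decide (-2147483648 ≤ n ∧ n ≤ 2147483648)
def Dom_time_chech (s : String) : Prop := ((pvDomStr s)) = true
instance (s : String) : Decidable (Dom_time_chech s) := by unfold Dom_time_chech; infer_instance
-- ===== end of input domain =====

-- B replaces A's flag loop and list membership by destructuring the string into five
-- characters (unpack failure = wrong length) and multiplying four ordinal-range digit
-- indicators: simpler decomposition, same values.

-- ===== PORT A =====
def num_list : List Char := ['0','1','2','3','4','5','6','7','8','9']

-- one iteration of A's for-loop (flag is the running state)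
def pvStepA (s : String) (flag : Int) (i : Int) : Int :=
  if i = 2 then flag  -- continue
  else match PySem.Str.pyGet? s i with
    | some c => if c ∈ num_list then flag else 0
    | none => flag  -- unreachable: i ranges over valid indices of s

def time_chech (s : String) : Int :=
  let _res : Int := 0
  let flag : Int := if PySem.Str.len s ≠ 5 then 0 else 1
  (PySem.List.pyRange 0 (PySem.Str.len s) 1).foldl (pvStepA s) flag

-- ===== PORT B =====
-- 48 <= ord(c) <= 57, as the 0/1 value Python's bool takes in the product
def pvDig (c : Char) : Int := if 48 ≤ c.toNat ∧ c.toNat ≤ 57 then 1 else 0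

def time_chech_alt (s : String) : Int :=
  match s.toList with
  | [a, b, _, d, e] => pvDig a * pvDig b * pvDig d * pvDig e
  | _ => 0  -- the tuple unpack raises ValueError, caught: return 0

-- ===== PRECONDITION & SPEC =====
def Spec_time_chech (s : String) (out : Int) : Prop := out = time_chech_alt s
instance (s : String) (out : Int) : Decidable (Spec_time_chech s out) := by unfold Spec_time_chech; infer_instance

-- ===== CLAIM (what is proved, stated in full; the proofs are below) =====
def Claim_equal_time_chech : Prop := ∀ (s : String), Dom_time_chech s → Spec_time_chech s (time_chech s)

-- ===== LEMMAS AND PROOFS =====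
theorem char_eq_of_toNat {c d : Char} (h : c.toNat = d.toNat) : c = d := by
  exact Char.ext (UInt32.toNat_inj.mp h)

theorem mem_num_iff (c : Char) : (c ∈ num_list) ↔ (48 ≤ c.toNat ∧ c.toNat ≤ 57) := by
  constructor
  · intro h
    fin_cases h <;> decide
  · rintro ⟨h1, h2⟩
    have hofn : c = Char.ofNat c.toNat := by
      apply char_eq_of_toNat
      rw [Char.toNat_ofNat]
      have : c.toNat.isValidChar := by
        unfold Nat.isValidChar
        omega
      simp [this]
    simp only [num_list, List.mem_cons, List.not_mem_nil, or_false]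
    have : c.toNat = 48 ∨ c.toNat = 49 ∨ c.toNat = 50 ∨ c.toNat = 51 ∨ c.toNat = 52 ∨
        c.toNat = 53 ∨ c.toNat = 54 ∨ c.toNat = 55 ∨ c.toNat = 56 ∨ c.toNat = 57 := by omega
    rcases this with h | h | h | h | h | h | h | h | h | h <;>
      (rw [h] at hofn; subst hofn; decide)

theorem stepA_zero (s : String) (i : Int) : pvStepA s 0 i = 0 := by
  unfold pvStepA
  by_cases hi : i = 2
  · simp [hi]
  · rw [if_neg hi]
    cases PySem.Str.pyGet? s i with
    | none => rfl
    | some c => by_cases hc : c ∈ num_list <;> simp [hc]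

theorem foldl_stepA_zero (s : String) (l : List Int) : l.foldl (pvStepA s) 0 = 0 := by
  induction l with
  | nil => rfl
  | cons x xs ih => rw [List.foldl_cons, stepA_zero]; exact ih

-- ===== VERDICT (by name: the statement is the Claim_ definition above) =====
set_option maxHeartbeats 1600000 in
theorem time_chech_spec : Claim_equal_time_chech := by
  intro s _
  unfold Spec_time_chech time_chech time_chech_alt
  by_cases h : s.toList.length = 5
  · obtain ⟨a, b, c, d, e, hl⟩ : ∃ a b c d e, s.toList = [a, b, c, d, e] := by
      match hm : s.toList, h with
      | [a, b, c, d, e], _ => exact ⟨a, b, c, d, e, rfl⟩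
    have hr : PySem.List.pyRange 0 5 1 = [0, 1, 2, 3, 4] := by decide
    have hg : ∀ (i : Int) (x : Char), PySem.List.pyGet? [a, b, c, d, e] i = some x →
        PySem.Str.pyGet? s i = some x := by
      intro i x hx
      rw [PySem.Str.pyGet?_eq, PySem.Chars.pyGet?_eq_listPyGet?, hl]; exact hx
    have h0 := hg 0 a rfl
    have h1 := hg 1 b rfl
    have h3 := hg 3 d rfl
    have h4 := hg 4 e rfl
    simp only [PySem.Str.len_eq, hl, List.length_cons, List.length_nil]
    norm_num [hr, List.foldl, pvStepA, h0, h1, h3, h4, pvDig]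
    simp only [← mem_num_iff]
    split_ifs <;> simp_all
  · have h5 : ((s.toList.length : Int) ≠ 5) := by exact_mod_cast h
    simp only [PySem.Str.len_eq]
    rw [if_pos h5, foldl_stepA_zero]
    match hml : s.toList with
    | [] => rfl
    | [a] => rfl
    | [a, b] => rfl
    | [a, b, c] => rfl
    | [a, b, c, d] => rfl
    | [a, b, c, d, e] => rw [hml] at h; simp at h
    | a :: b :: c :: d :: e :: f :: t => rfl
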